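-- pv_equiv track=rewrite | github.com/RCEccleston/PLM_Allosteric_Classification | finetuning/Ankh/Ankh_large_finetuning.py | segment_sequences_with_sliding_windows
-- ===== SOURCE A (Python) =====
-- def segment_sequences_with_sliding_windows(sequences, labels, window_size=512, step_size=128):
--     """
--     Segment a list of sequences and their corresponding labels into sliding overlapping windows.
--
--     Args:
--         sequences (list of str): List of protein sequences to segment.
--         labels (list of list of int): List of corresponding labels (same length as sequences).
--         window_size (int): Size of each sliding window.
--         step_size (int): Step size for the sliding window.
--
--     Returns:
--         segmented_sequences (list of str): List of segmented sequences.
--         segmented_labels (list of list of int): List of segmented labels corresponding to sequences.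
--     """
--     segmented_sequences = []
--     segmented_labels = []
--
--     for seq, lbl in zip(sequences, labels):
--         # Ensure the sequence and label lengths match
--         assert len(seq) == len(lbl), "Sequence and label length mismatch!"
--
--         # Segment the sequence and labels using sliding windows
--         for start_idx in range(0, len(seq), step_size):
--             end_idx = start_idx + window_size
--
--             # Extract windowed sequences and labels
--             window_seq = seq[start_idx:end_idx]
--             window_lbl = lbl[start_idx:end_idx]
--
--             # If the window is smaller than window_size (e.g., at the end), pad
--             if len(window_seq) < window_size:
--                 # Pad the sequence with "X" and labels with 0
--                 window_seq += "X" * (window_size - len(window_seq))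
--                 window_lbl += [0] * (window_size - len(window_lbl))
--
--             # Add the segmented window to the list
--             segmented_sequences.append(window_seq)
--             segmented_labels.append(window_lbl)
--
--     return segmented_sequences, segmented_labels
-- ===== SOURCE B (Python) =====
-- def segment_sequences_with_sliding_windows(sequences, labels, window_size=512, step_size=128):
--     """Closed-form window count + per-index window construction with defaults.
--
--     Instead of slicing and conditionally padding, compute the number of
--     windows per pair by ceiling division and build each fixed-length window
--     element by element, reading past-the-end positions as the pad value.
--     A window of non-positive size is empty.
--     """
--     segmented_sequences = []
--     segmented_labels = []
--
--     for seq, lbl in zip(sequences, labels):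
--         assert len(seq) == len(lbl), "Sequence and label length mismatch!"
--
--         num_windows = -(-len(seq) // step_size) if step_size > 0 else 0
--         for k in range(num_windows):
--             base = k * step_size
--             segmented_sequences.append(
--                 "".join(seq[base + j] if base + j < len(seq) else "X"
--                         for j in range(window_size)))
--             segmented_labels.append(
--                 [lbl[base + j] if base + j < len(lbl) else 0
--                  for j in range(window_size)])
--
--     return segmented_sequences, segmented_labels
-- ===== Notes on version B (the rewrite author's own statement) =====
-- stated objective: alternative
-- what changed: B replaces A's slice-then-conditionally-pad over a materialised start range by a closed-form ceiling-division window count and per-index window construction that reads past-the-end positions as the pad value, so slicing and padding disappear.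
-- intended difference: When window_size is negative (with step_size > 0 and some sequence longer than -window_size) A's negative slice stop wraps around and yields non-empty unpadded windows of length len(seq)+window_size, while B returns the empty window; a non-positive window size should produce empty windows, so B's value is the intended one. — e.g. on segment_sequences_with_sliding_windows(["AB"], [[1, 2]], -1, 1): A returns (["A", ""], [[1], []]), B returns (["", ""], [[], []])
import Mathlib
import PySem

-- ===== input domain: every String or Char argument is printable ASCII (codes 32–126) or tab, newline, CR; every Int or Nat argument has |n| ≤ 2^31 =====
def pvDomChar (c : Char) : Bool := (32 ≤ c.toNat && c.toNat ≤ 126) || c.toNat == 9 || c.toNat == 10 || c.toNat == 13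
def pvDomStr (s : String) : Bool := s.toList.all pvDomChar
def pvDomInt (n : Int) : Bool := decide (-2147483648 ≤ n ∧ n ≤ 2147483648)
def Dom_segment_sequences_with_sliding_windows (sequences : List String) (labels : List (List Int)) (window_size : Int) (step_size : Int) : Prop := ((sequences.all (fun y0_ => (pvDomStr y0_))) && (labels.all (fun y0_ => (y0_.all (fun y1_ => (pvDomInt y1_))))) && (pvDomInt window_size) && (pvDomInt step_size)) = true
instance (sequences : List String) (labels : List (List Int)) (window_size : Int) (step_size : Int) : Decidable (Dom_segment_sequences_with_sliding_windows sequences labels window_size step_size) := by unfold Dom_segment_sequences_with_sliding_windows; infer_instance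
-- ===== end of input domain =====

-- B replaces A's slice-then-conditionally-pad loop over a materialised start range by a
-- closed-form ceiling-division window count and per-index window construction with a
-- pad default (objective: alternative algorithm; on negative window_size the two differ, see D_).

-- ===== PORT A =====
-- loop body of A's outer 'for seq, lbl in zip(...)' (the assert is value-neutral: Pre_ admits only inputs where it holds)
def pvPairA (window_size step_size : Int) (acc : List String × List (List Int)) (p : String × List Int) : List String × List (List Int) :=
  (PySem.List.pyRange 0 (PySem.Str.len p.1) step_size).foldl
    (fun acc2 start_idx =>
      let end_idx := start_idx + window_size
      let window_seq := PySem.Str.slice p.1 (some start_idx) (some end_idx)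
      let window_lbl := PySem.List.slice p.2 (some start_idx) (some end_idx)
      let window_seq' := if PySem.Str.len window_seq < window_size then
          String.ofList (window_seq.toList ++ List.replicate (window_size - PySem.Str.len window_seq).toNat 'X')
        else window_seq
      let window_lbl' := if PySem.Str.len window_seq < window_size then
          window_lbl ++ List.replicate (window_size - (window_lbl.length : Int)).toNat 0
        else window_lbl
      (acc2.1 ++ [window_seq'], acc2.2 ++ [window_lbl'])) acc

def segment_sequences_with_sliding_windows (sequences : List String) (labels : List (List Int)) (window_size : Int) (step_size : Int) : List String × List (List Int) :=
  (sequences.zip labels).foldl (pvPairA window_size step_size) ([], [])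

-- ===== PORT B =====
-- loop body of B's outer loop: ceiling-division window count, then each window built index by index
def pvPairB (window_size step_size : Int) (acc : List String × List (List Int)) (p : String × List Int) : List String × List (List Int) :=
  let num_windows := if 0 < step_size then -(PySem.Int.floordiv (-(PySem.Str.len p.1)) step_size) else 0
  (PySem.List.pyRange 0 num_windows 1).foldl
    (fun acc2 k =>
      let base := k * step_size
      (acc2.1 ++ [String.ofList ((PySem.List.pyRange 0 window_size 1).map
          (fun j => if base + j < PySem.Str.len p.1 then PySem.List.pyGetD p.1.toList (base + j) 'X' else 'X'))],
       acc2.2 ++ [(PySem.List.pyRange 0 window_size 1).map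
          (fun j => if base + j < (p.2.length : Int) then PySem.List.pyGetD p.2 (base + j) 0 else 0)])) acc

def segment_sequences_with_sliding_windows_alt (sequences : List String) (labels : List (List Int)) (window_size : Int) (step_size : Int) : List String × List (List Int) :=
  (sequences.zip labels).foldl (pvPairB window_size step_size) ([], [])

-- ===== PRECONDITION & SPEC =====
-- Pre_ excludes exactly the inputs where A raises: a zipped pair whose sequence and label
-- lengths differ (AssertionError), and step_size = 0 with a nonempty zip (range ValueError).
def Pre_segment_sequences_with_sliding_windows (sequences : List String) (labels : List (List Int)) (window_size : Int) (step_size : Int) : Prop :=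
  (∀ p ∈ sequences.zip labels, PySem.Str.len p.1 = (p.2.length : Int)) ∧
  (sequences.zip labels = [] ∨ step_size ≠ 0)
instance (sequences : List String) (labels : List (List Int)) (window_size : Int) (step_size : Int) : Decidable (Pre_segment_sequences_with_sliding_windows sequences labels window_size step_size) := by unfold Pre_segment_sequences_with_sliding_windows; infer_instance

def pvWitness_segment_sequences_with_sliding_windows : List String × List (List Int) × Int × Int := (["ABCDE"], [[1, 2, 3, 4, 5]], 3, 2)

-- When window_size is negative (step_size > 0 and some zipped sequence longer than -window_size),
-- A's negative slice stop wraps around and yields non-empty unpadded windows of length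
-- len(seq)+window_size, while B returns the empty window for every start; a non-positive
-- window size should produce empty windows, so B's value is the intended one.
def D_segment_sequences_with_sliding_windows (sequences : List String) (labels : List (List Int)) (window_size : Int) (step_size : Int) : Prop :=
  window_size < 0 ∧ 0 < step_size ∧ ∃ p ∈ sequences.zip labels, -window_size < PySem.Str.len p.1
instance (sequences : List String) (labels : List (List Int)) (window_size : Int) (step_size : Int) : Decidable (D_segment_sequences_with_sliding_windows sequences labels window_size step_size) := by unfold D_segment_sequences_with_sliding_windows; infer_instance

def Spec_segment_sequences_with_sliding_windows (sequences : List String) (labels : List (List Int)) (window_size : Int) (step_size : Int) (out : List String × List (List Int)) : Prop := ¬ D_segment_sequences_with_sliding_windows sequences labels window_size step_size → out = segment_sequences_with_sliding_windows_alt sequences labels window_size step_size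
instance (sequences : List String) (labels : List (List Int)) (window_size : Int) (step_size : Int) (out : List String × List (List Int)) : Decidable (Spec_segment_sequences_with_sliding_windows sequences labels window_size step_size out) := by unfold Spec_segment_sequences_with_sliding_windows; infer_instance

def pvDiffWitness_segment_sequences_with_sliding_windows : List String × List (List Int) × Int × Int := (["AB"], [[1, 2]], -1, 1)
def pvDiffWitnessOut_segment_sequences_with_sliding_windows : (List String × List (List Int)) × (List String × List (List Int)) :=
  ((["A", ""], [[1], []]), (["", ""], [[], []]))

-- ===== CLAIM (what is proved, stated in full; the proofs are below) =====
def Claim_unchanged_segment_sequences_with_sliding_windows : Prop := ∀ (sequences : List String) (labels : List (List Int)) (window_size : Int) (step_size : Int), Dom_segment_sequences_with_sliding_windows sequences labels window_size step_size → Pre_segment_sequences_with_sliding_windows sequences labels window_size step_size → Spec_segment_sequences_with_sliding_windows sequences labels window_size step_size (segment_sequences_with_sliding_windows sequences labels window_size step_size)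
def Claim_changed_segment_sequences_with_sliding_windows : Prop := Dom_segment_sequences_with_sliding_windows (pvDiffWitness_segment_sequences_with_sliding_windows.1) (pvDiffWitness_segment_sequences_with_sliding_windows.2.1) (pvDiffWitness_segment_sequences_with_sliding_windows.2.2.1) (pvDiffWitness_segment_sequences_with_sliding_windows.2.2.2) ∧ Pre_segment_sequences_with_sliding_windows (pvDiffWitness_segment_sequences_with_sliding_windows.1) (pvDiffWitness_segment_sequences_with_sliding_windows.2.1) (pvDiffWitness_segment_sequences_with_sliding_windows.2.2.1) (pvDiffWitness_segment_sequences_with_sliding_windows.2.2.2) ∧ D_segment_sequences_with_sliding_windows (pvDiffWitness_segment_sequences_with_sliding_windows.1) (pvDiffWitness_segment_sequences_with_sliding_windows.2.1) (pvDiffWitness_segment_sequences_with_sliding_windows.2.2.1) (pvDiffWitness_segment_sequences_with_sliding_windows.2.2.2) ∧ segment_sequences_with_sliding_windows (pvDiffWitness_segment_sequences_with_sliding_windows.1) (pvDiffWitness_segment_sequences_with_sliding_windows.2.1) (pvDiffWitness_segment_sequences_with_sliding_windows.2.2.1) (pvDiffWitness_segment_sequences_with_sliding_windows.2.2.2) =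 pvDiffWitnessOut_segment_sequences_with_sliding_windows.1 ∧ segment_sequences_with_sliding_windows_alt (pvDiffWitness_segment_sequences_with_sliding_windows.1) (pvDiffWitness_segment_sequences_with_sliding_windows.2.1) (pvDiffWitness_segment_sequences_with_sliding_windows.2.2.1) (pvDiffWitness_segment_sequences_with_sliding_windows.2.2.2) = pvDiffWitnessOut_segment_sequences_with_sliding_windows.2 ∧ pvDiffWitnessOut_segment_sequences_with_sliding_windows.1 ≠ pvDiffWitnessOut_segment_sequences_with_sliding_windows.2
def Claim_exact_segment_sequences_with_sliding_windows : Prop := ∀ (sequences : List String) (labels : List (List Int)) (window_size : Int) (step_size : Int), Dom_segment_sequences_with_sliding_windows sequences labels window_size step_size → Pre_segment_sequences_with_sliding_windows sequences labels window_size step_size → D_segment_sequences_with_sliding_windows sequences labels window_size step_size → segment_sequences_with_sliding_windows sequences labels window_size step_size ≠ segment_sequences_with_sliding_windows_alt sequences labels window_size step_size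

-- ===== LEMMAS AND PROOFS =====

-- A's window at start s: slice then pad if short (proof-side normal form of A's inner body)
def pvWinA {α : Type} (xs : List α) (fill : α) (ws s : Int) : List α :=
  if ((PySem.List.slice xs (some s) (some (s + ws))).length : Int) < ws then
    PySem.List.slice xs (some s) (some (s + ws))
      ++ List.replicate (ws - ((PySem.List.slice xs (some s) (some (s + ws))).length : Int)).toNat fill
  else PySem.List.slice xs (some s) (some (s + ws))

-- B's window at start base: per-index construction with a default
def pvWinB {α : Type} (xs : List α) (fill : α) (ws base : Int) : List α :=
  (PySem.List.pyRange 0 ws 1).map (fun j => if base + j < (xs.length : Int) then PySem.List.pyGetD xs (base + j) fill else fill)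

-- B's closed-form window count
def pvNum (n ss : Int) : Int := if 0 < ss then -(PySem.Int.floordiv (-n) ss) else 0

def pvWinsA {α : Type} (xs : List α) (fill : α) (ws ss : Int) : List (List α) :=
  (PySem.List.pyRange 0 (xs.length : Int) ss).map (pvWinA xs fill ws)

def pvWinsB {α : Type} (xs : List α) (fill : α) (ws ss : Int) : List (List α) :=
  (PySem.List.pyRange 0 (pvNum (xs.length : Int) ss) 1).map (fun k => pvWinB xs fill ws (k * ss))

theorem pv_str_ext (s t : String) (h : s.toList = t.toList) : s = t := by
  rw [← String.ofList_toList (s := s), h, String.ofList_toList]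

-- a fold that appends one element to each component is a pair of maps
theorem pv_foldl_pair {β γ δ : Type} (F : β → γ) (G : β → δ) :
    ∀ (l : List β) (acc : List γ × List δ),
      l.foldl (fun a x => (a.1 ++ [F x], a.2 ++ [G x])) acc = (acc.1 ++ l.map F, acc.2 ++ l.map G) := by
  intro l
  induction l with
  | nil => intro acc; simp
  | cons x t ih => intro acc; simp [ih]

theorem pv_pairA_eq (ws ss : Int) (p : String × List Int)
    (hlen : PySem.Str.len p.1 = (p.2.length : Int)) (acc : List String × List (List Int)) :
    pvPairA ws ss acc p
      = (acc.1 ++ (pvWinsA p.1.toList 'X' ws ss).map String.ofList, acc.2 ++ pvWinsA p.2 0 ws ss) := by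
  have hlen' : p.1.toList.length = p.2.length := by
    rw [PySem.Str.len_eq] at hlen; exact_mod_cast hlen
  simp only [pvPairA]
  rw [pv_foldl_pair]
  unfold pvWinsA
  rw [List.map_map]
  simp only [PySem.Str.len_eq, hlen']
  simp only [Prod.mk.injEq]
  refine ⟨?_, ?_⟩
  · congr 1
    apply List.map_congr_left
    intro s _
    apply pv_str_ext
    simp only [Function.comp_apply, pvWinA, apply_ite String.toList, String.toList_ofList,
      PySem.Str.toList_slice, PySem.Chars.slice_eq_listSlice]
  · congr 1
    apply List.map_congr_left
    intro s _
    simp only [pvWinA, PySem.Str.toList_slice, PySem.Chars.slice_eq_listSlice,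
      PySem.List.length_slice, hlen']

theorem pv_pairB_eq (ws ss : Int) (p : String × List Int)
    (hlen : PySem.Str.len p.1 = (p.2.length : Int)) (acc : List String × List (List Int)) :
    pvPairB ws ss acc p
      = (acc.1 ++ (pvWinsB p.1.toList 'X' ws ss).map String.ofList, acc.2 ++ pvWinsB p.2 0 ws ss) := by
  have hlen' : p.1.toList.length = p.2.length := by
    rw [PySem.Str.len_eq] at hlen; exact_mod_cast hlen
  simp only [pvPairB]
  rw [pv_foldl_pair]
  simp only [pvWinsB, pvWinB, pvNum, List.map_map, Function.comp_def, PySem.Str.len_eq, hlen']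

-- outer folds in flatMap normal form
theorem pv_foldA_eq (ws ss : Int) :
    ∀ (ps : List (String × List Int)) (acc : List String × List (List Int)),
      (∀ p ∈ ps, PySem.Str.len p.1 = (p.2.length : Int)) →
      ps.foldl (pvPairA ws ss) acc
        = (acc.1 ++ ps.flatMap (fun p => (pvWinsA p.1.toList 'X' ws ss).map String.ofList),
           acc.2 ++ ps.flatMap (fun p => pvWinsA p.2 0 ws ss)) := by
  intro ps
  induction ps with
  | nil => intro acc _; simp
  | cons p t ih =>
    intro acc h
    rw [List.foldl_cons, pv_pairA_eq ws ss p (h p (by simp)) acc,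
        ih _ (fun q hq => h q (List.mem_cons_of_mem _ hq))]
    simp [List.append_assoc]

theorem pv_foldB_eq (ws ss : Int) :
    ∀ (ps : List (String × List Int)) (acc : List String × List (List Int)),
      (∀ p ∈ ps, PySem.Str.len p.1 = (p.2.length : Int)) →
      ps.foldl (pvPairB ws ss) acc
        = (acc.1 ++ ps.flatMap (fun p => (pvWinsB p.1.toList 'X' ws ss).map String.ofList),
           acc.2 ++ ps.flatMap (fun p => pvWinsB p.2 0 ws ss)) := by
  intro ps
  induction ps with
  | nil => intro acc _; simp
  | cons p t ih =>
    intro acc h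
    rw [List.foldl_cons, pv_pairB_eq ws ss p (h p (by simp)) acc,
        ih _ (fun q hq => h q (List.mem_cons_of_mem _ hq))]
    simp [List.append_assoc]

-- the ceiling-division count written with Python's floor division
theorem pv_num_eq (n ss : Int) (_hn : 0 ≤ n) (hss : 0 < ss) :
    pvNum n ss = if 0 < n then (n + ss - 1) / ss else 0 := by
  rw [pvNum, if_pos hss, (PySem.Int.neg_floordiv_neg_eq_iff_of_pos hss)]
  split_ifs with h
  · have hdm := Int.mul_ediv_add_emod (n + ss - 1) ss
    have hr0 := Int.emod_nonneg (n + ss - 1) (by omega : ss ≠ 0)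
    have hr1 := Int.emod_lt_of_pos (n + ss - 1) hss
    have e1 : ((n + ss - 1) / ss - 1) * ss = ss * ((n + ss - 1) / ss) - ss := by ring
    have e2 : ((n + ss - 1) / ss) * ss = ss * ((n + ss - 1) / ss) := by ring
    rw [e1, e2]
    omega
  · constructor <;> omega

theorem pv_num_bracket (n ss : Int) (hn : 0 ≤ n) (hss : 0 < ss) :
    (pvNum n ss - 1) * ss < n ∧ n ≤ pvNum n ss * ss := by
  have h := (PySem.Int.neg_floordiv_neg_eq_iff_of_pos hss (a := n) (q := pvNum n ss)).mp
  apply h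
  rw [pvNum, if_pos hss]

theorem pv_count_eq (n ss : Int) (hn : 0 ≤ n) (hss : 0 < ss) :
    (pvNum n ss - 0).toNat = (if (0:Int) < n then ((n - 0 + ss - 1) / ss).toNat else 0) := by
  rw [pv_num_eq n ss hn hss]
  have e : n - 0 + ss - 1 = n + ss - 1 := by ring
  rw [e]
  split_ifs with h
  · omega
  · omega

theorem pv_num_pos (n ss : Int) (hn : 0 < n) (hss : 0 < ss) : 0 < pvNum n ss := by
  have hb := pv_num_bracket n ss (by omega) hss
  by_contra hle
  push Not at hle
  have : pvNum n ss * ss ≤ 0 := mul_nonpos_of_nonpos_of_nonneg hle (by omega)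
  omega

-- the two windows agree for nonnegative window size (and for sequences no longer than -window_size)
theorem pv_win_eq {α : Type} (xs : List α) (fill : α) (ws s : Int)
    (h0 : 0 ≤ s) (hsn : s < (xs.length : Int))
    (hcase : 0 ≤ ws ∨ (xs.length : Int) ≤ -ws) :
    pvWinA xs fill ws s = pvWinB xs fill ws s := by
  rcases hcase with hws | hshort
  · unfold pvWinA pvWinB
    rw [PySem.List.slice_toNat xs h0 (by omega)]
    set w := List.take ((s + ws).toNat - s.toNat) (List.drop s.toNat xs) with hw
    have hwlen : w.length = min ((s + ws).toNat - s.toNat) (xs.length - s.toNat) := by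
      simp [hw]
    have hnorm : (if (w.length : Int) < ws then w ++ List.replicate (ws - (w.length : Int)).toNat fill else w)
        = w ++ List.replicate (ws - (w.length : Int)).toNat fill := by
      split_ifs with h
      · rfl
      · have : (ws - (w.length : Int)).toNat = 0 := by omega
        simp [this]
    rw [hnorm, PySem.List.pyRange_one, List.map_map]
    apply List.ext_getElem
    · simp [hwlen]; omega
    · intro i hi1 hi2
      simp only [List.length_append, List.length_replicate, hwlen] at hi1
      simp only [List.length_map, List.length_range] at hi2
      rw [List.getElem_map, List.getElem_range]
      simp only [Function.comp_apply, zero_add]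
      rw [List.getElem_append]
      split_ifs with hin hlt hlt
      · rw [PySem.List.pyGetD_eq_getElem xs fill (by omega) (by omega)]
        simp only [hw, List.getElem_take, List.getElem_drop]
        congr 1
        omega
      · exfalso; rw [hwlen] at hin; omega
      · exfalso; rw [hwlen] at hin; omega
      · rw [List.getElem_replicate]
  · have hws : ws ≤ 0 := by omega
    have hB : pvWinB xs fill ws s = [] := by
      unfold pvWinB
      rw [PySem.List.pyRange_one_eq_nil (by omega)]
      rfl
    have hlen0 : (PySem.List.slice xs (some s) (some (s + ws))).length = 0 := by
      rw [PySem.List.length_slice]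
      simp only [PySem.List.clampIdx]
      split_ifs <;> omega
    have hA : pvWinA xs fill ws s = [] := by
      unfold pvWinA
      rw [List.eq_nil_of_length_eq_zero hlen0]
      simp only [List.length_nil]
      rw [if_neg (by omega)]
    rw [hA, hB]

theorem pv_wins_eq {α : Type} (xs : List α) (fill : α) (ws ss : Int) (hss : 0 < ss)
    (hcase : 0 ≤ ws ∨ (xs.length : Int) ≤ -ws) :
    pvWinsA xs fill ws ss = pvWinsB xs fill ws ss := by
  have hn : (0:Int) ≤ (xs.length : Int) := by positivity
  unfold pvWinsA pvWinsB
  rw [PySem.List.pyRange_of_pos 0 (xs.length : Int) hss, PySem.List.pyRange_one,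
      ← pv_count_eq (xs.length : Int) ss hn hss, List.map_map, List.map_map]
  apply List.map_congr_left
  intro k hk
  have hkN : k < (pvNum (xs.length : Int) ss - 0).toNat := List.mem_range.mp hk
  have hbr := pv_num_bracket (xs.length : Int) ss hn hss
  have hkle : (k : Int) ≤ pvNum (xs.length : Int) ss - 1 := by omega
  have hmul : ss * (k : Int) ≤ ss * (pvNum (xs.length : Int) ss - 1) :=
    mul_le_mul_of_nonneg_left hkle (by omega)
  have hlt : ss * (k : Int) < (xs.length : Int) := by nlinarith [hbr.1]
  simp only [Function.comp_apply, zero_add]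
  rw [show ((k : Int) * ss) = ss * (k : Int) by ring]
  exact pv_win_eq xs fill ws (ss * (k : Int)) (by positivity) hlt hcase

theorem pv_wins_neg {α : Type} (xs : List α) (fill : α) (ws ss : Int) (hss : ss < 0) :
    pvWinsA xs fill ws ss = [] ∧ pvWinsB xs fill ws ss = [] := by
  constructor
  · unfold pvWinsA
    rw [show PySem.List.pyRange 0 (xs.length : Int) ss = [] by
      simp [PySem.List.pyRange, show ss ≠ 0 by omega, show ¬ (0:Int) < ss by omega,
            show ¬ (xs.length : Int) < 0 by omega]]
    rfl
  · unfold pvWinsB pvNum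
    rw [if_neg (by omega)]
    rw [PySem.List.pyRange_one_eq_nil (by omega)]
    rfl

theorem pv_wins_length {α : Type} (xs : List α) (fill : α) (ws ss : Int) (hss : 0 < ss) :
    (pvWinsA xs fill ws ss).length = (pvWinsB xs fill ws ss).length := by
  have hn : (0:Int) ≤ (xs.length : Int) := by positivity
  unfold pvWinsA pvWinsB
  rw [PySem.List.pyRange_of_pos 0 (xs.length : Int) hss]
  simp only [List.length_map, List.length_range, PySem.List.length_pyRange_one]
  rw [pv_count_eq (xs.length : Int) ss hn hss]

-- inside D_: the first window of a long-enough pair differs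
theorem pv_wins_ne {α : Type} (xs : List α) (fill : α) (ws ss : Int)
    (hws : ws < 0) (hss : 0 < ss) (hlong : -ws < (xs.length : Int)) :
    pvWinsA xs fill ws ss ≠ pvWinsB xs fill ws ss := by
  have hn : (0:Int) < (xs.length : Int) := by omega
  have hpos := pv_num_pos (xs.length : Int) ss hn hss
  intro h
  have e := congrArg (fun l => l[0]?) h
  simp only [] at e
  unfold pvWinsA pvWinsB at e
  rw [PySem.List.pyRange_of_pos 0 (xs.length : Int) hss] at e
  have hm0 : 0 < (if (0:Int) < (xs.length : Int) then (((xs.length : Int) - 0 + ss - 1) / ss).toNat else 0) := by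
    rw [← pv_count_eq (xs.length : Int) ss (by omega) hss]
    omega
  have hm1 : 0 < (PySem.List.pyRange 0 (pvNum (xs.length : Int) ss) 1).length := by
    rw [PySem.List.length_pyRange_one]
    omega
  rw [List.getElem?_map, List.getElem?_map, List.getElem?_map, List.getElem?_range hm0,
      List.getElem?_eq_getElem hm1, PySem.List.getElem_pyRange_one] at e
  simp only [Option.map_some, Nat.cast_zero, mul_zero, add_zero, zero_add, zero_mul, Option.some.injEq] at e
  have hB : pvWinB xs fill ws 0 = [] := by
    unfold pvWinB
    rw [PySem.List.pyRange_one_eq_nil (by omega)]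
    rfl
  have hsl : 0 < (PySem.List.slice xs (some 0) (some (0 + ws))).length := by
    rw [PySem.List.length_slice]
    simp only [PySem.List.clampIdx]
    split_ifs <;> omega
  have hlenA : 0 < (pvWinA xs fill ws 0).length := by
    unfold pvWinA
    split_ifs with hc
    · simp; omega
    · omega
  rw [e, hB] at hlenA
  simp at hlenA

theorem pv_flatMap_congr {α β : Type} (l : List α) (f g : α → List β)
    (h : ∀ x ∈ l, f x = g x) : l.flatMap f = l.flatMap g := by
  simp only [List.flatMap_def]
  rw [List.map_congr_left h]

-- flattened label outputs differ as soon as one zipped pair is long enough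
theorem pv_flat_ne (ws ss : Int) (hws : ws < 0) (hss : 0 < ss) :
    ∀ (ps : List (String × List Int)),
      (∀ p ∈ ps, PySem.Str.len p.1 = (p.2.length : Int)) →
      (∃ p ∈ ps, -ws < PySem.Str.len p.1) →
      ps.flatMap (fun p => pvWinsA p.2 (0:Int) ws ss) ≠ ps.flatMap (fun p => pvWinsB p.2 (0:Int) ws ss) := by
  intro ps
  induction ps with
  | nil => intro _ hex; exact absurd hex (by simp)
  | cons p t ih =>
    intro hlen hex h
    simp only [List.flatMap_cons] at h
    have hL := pv_wins_length p.2 (0:Int) ws ss hss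
    obtain ⟨h1, h2⟩ := List.append_inj h hL
    by_cases hp : -ws < PySem.Str.len p.1
    · have hplen : -ws < (p.2.length : Int) := by
        rw [← hlen p (by simp)]; exact hp
      exact pv_wins_ne p.2 (0:Int) ws ss hws hss hplen h1
    · have hex' : ∃ q ∈ t, -ws < PySem.Str.len q.1 := by
        rcases hex with ⟨q, hq, hql⟩
        rcases List.mem_cons.mp hq with rfl | hqt
        · exact absurd hql hp
        · exact ⟨q, hqt, hql⟩
      exact ih (fun q hq => hlen q (List.mem_cons_of_mem _ hq)) hex' h2

-- ===== VERDICT (by name: the statements are the Claim_ definitions above) =====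
theorem segment_sequences_with_sliding_windows_spec : Claim_unchanged_segment_sequences_with_sliding_windows := by
  intro sequences labels ws ss _ hpre hnd
  unfold segment_sequences_with_sliding_windows segment_sequences_with_sliding_windows_alt
  obtain ⟨hlen, hor⟩ := hpre
  rw [pv_foldA_eq ws ss _ _ hlen, pv_foldB_eq ws ss _ _ hlen]
  have hpp : ∀ p ∈ sequences.zip labels,
      pvWinsA p.1.toList 'X' ws ss = pvWinsB p.1.toList 'X' ws ss ∧
      pvWinsA p.2 (0:Int) ws ss = pvWinsB p.2 (0:Int) ws ss := by
    intro p hp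
    rcases hor with hz | hss0
    · rw [hz] at hp; cases hp
    · rcases lt_trichotomy ss 0 with hneg | hzero | hpos
      · constructor
        · rw [(pv_wins_neg p.1.toList 'X' ws ss hneg).1, (pv_wins_neg p.1.toList 'X' ws ss hneg).2]
        · rw [(pv_wins_neg p.2 (0:Int) ws ss hneg).1, (pv_wins_neg p.2 (0:Int) ws ss hneg).2]
      · exact absurd hzero hss0
      · have hcase1 : 0 ≤ ws ∨ (p.1.toList.length : Int) ≤ -ws := by
          by_cases hws : 0 ≤ ws
          · exact Or.inl hws
          · right
            unfold D_segment_sequences_with_sliding_windows at hnd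
            push Not at hnd
            have := hnd (by omega) hpos p hp
            rw [PySem.Str.len_eq] at this
            omega
        have hcase2 : 0 ≤ ws ∨ ((p.2.length : Nat) : Int) ≤ -ws := by
          rcases hcase1 with h | h
          · exact Or.inl h
          · right
            have := hlen p hp
            rw [PySem.Str.len_eq] at this
            omega
        exact ⟨pv_wins_eq p.1.toList 'X' ws ss hpos hcase1,
               pv_wins_eq p.2 (0:Int) ws ss hpos hcase2⟩
  simp only [Prod.mk.injEq, List.nil_append]
  refine ⟨?_, ?_⟩
  · apply pv_flatMap_congr
    intro p hp
    rw [(hpp p hp).1]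
  · exact pv_flatMap_congr _ _ _ (fun p hp => (hpp p hp).2)

theorem segment_sequences_with_sliding_windows_changed : Claim_changed_segment_sequences_with_sliding_windows := by
  unfold Claim_changed_segment_sequences_with_sliding_windows; decide

theorem segment_sequences_with_sliding_windows_tight : Claim_exact_segment_sequences_with_sliding_windows := by
  intro sequences labels ws ss _ hpre hd hEq
  obtain ⟨hlen, _⟩ := hpre
  obtain ⟨hws, hss, q, hq, hql⟩ := hd
  have h2 := congrArg Prod.snd hEq
  unfold segment_sequences_with_sliding_windows segment_sequences_with_sliding_windows_alt at h2
  rw [pv_foldA_eq ws ss _ _ hlen, pv_foldB_eq ws ss _ _ hlen] at h2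
  simp only [List.nil_append] at h2
  exact pv_flat_ne ws ss hws hss (sequences.zip labels) hlen ⟨q, hq, hql⟩ h2
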